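-- pv_equiv track=rewrite | github.com/Arsen1302/Code-copy-detector | TestData/solutions/problem_875_3.py | solution_875_3
-- ===== SOURCE A (Python) =====
-- from typing import List
--
-- def solution_875_3(n: int, ranges: List[int]) -> int:
--     start, end = 0, 0
--     taps = 0
--
--     while end< n:
--         for i in range(len(ranges)):
--             if i-ranges[i] <= start and i+ ranges[i]>end:
--                 end = i + ranges[i]
--         if start == end:
--             return -1
--         taps +=1
--         start = end
--     return taps
-- ===== SOURCE B (Python) =====
-- from typing import List
--
-- def solution_875_3(n: int, ranges: List[int]) -> int:
--     if n <= 0: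
--         return 0
--     m = len(ranges)
--     # Taps sit at positions 0..m-1, so any useful tap interval opens below min(n, m):
--     # an interval opening at left >= m has a negative range and ends before it opens.
--     N = min(n, m)
--     if N == 0:
--         return -1  # no taps at all, but a nonempty garden
--     far = list(range(N))  # far[x]: farthest right endpoint among taps opening at (clamped) x
--     for i, r in enumerate(ranges):
--         left = i - r
--         if left < N:
--             li = max(left, 0)
--             if i + r > far[li]:
--                 far[li] = i + r
--     # running prefix maximum
--     acc = []
--     mx = far[0]
--     for v in far:
--         mx = max(mx, v)
--         acc.append(mx)
--     far = acc
--     taps = 0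
--     end = 0
--     while end < n:
--         new = max(end, far[min(end, N - 1)])
--         if new == end:
--             return -1
--         taps += 1
--         end = new
--     return taps
-- ===== Notes on version B (the rewrite author's own statement) =====
-- stated objective: alternative
-- what changed: Instead of rescanning all taps on every expansion round, B precomputes a capped max-reach array indexed by interval start plus its running prefix maximum, and then runs a jump-game greedy with O(1) lookups per round.
import Mathlib
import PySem

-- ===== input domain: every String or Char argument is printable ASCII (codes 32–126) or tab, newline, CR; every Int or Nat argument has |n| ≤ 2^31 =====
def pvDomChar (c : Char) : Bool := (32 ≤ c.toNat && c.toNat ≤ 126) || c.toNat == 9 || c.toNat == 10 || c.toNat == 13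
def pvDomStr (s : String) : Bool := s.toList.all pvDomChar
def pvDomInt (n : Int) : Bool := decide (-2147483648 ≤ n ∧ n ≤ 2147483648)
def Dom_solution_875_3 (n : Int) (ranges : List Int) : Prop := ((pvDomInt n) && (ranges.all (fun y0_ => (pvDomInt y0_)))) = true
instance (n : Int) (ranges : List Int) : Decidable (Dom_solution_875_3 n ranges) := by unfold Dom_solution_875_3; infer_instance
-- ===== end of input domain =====

-- B replaces A's per-round rescan of all taps by a capped max-reach array + one prefix-max
-- pass + a jump-game greedy with O(1) lookups per round (an alternative algorithm; no speed claim).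

-- ===== PORT A =====
-- the inner 'for i in range(len(ranges)):' loop of A (start is A's 'start', e0 the current 'end');
-- ranges[i] is always in range here, so pyGetD with default 0 equals Python's ranges[i]
def aStep (ranges : List Int) (start e0 : Int) : Int :=
  (PySem.List.pyRange 0 (ranges.length : Int) 1).foldl
    (fun e i =>
      if i - PySem.List.pyGetD ranges i 0 ≤ start ∧ i + PySem.List.pyGetD ranges i 0 > e
      then i + PySem.List.pyGetD ranges i 0 else e) e0

-- A's 'while end < n' loop; fuel is only a totality guard: 'end' strictly increases inside [0,n),
-- so n.toNat + 1 iterations are never exhausted on the inputs Python reaches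
def aLoop (fuel : Nat) (n : Int) (ranges : List Int) (start e taps : Int) : Int :=
  match fuel with
  | 0 => -1
  | f + 1 =>
    if e < n then
      let e' := aStep ranges start e
      if start == e' then -1
      else aLoop f n ranges e' e' (taps + 1)
    else taps

def solution_875_3 (n : Int) (ranges : List Int) : Int :=
  aLoop (n.toNat + 1) n ranges 0 0 0

-- ===== PORT B =====
-- one step of B's build loop 'for i, r in enumerate(ranges): ...'; indices li < N = len(far),
-- so getD/set with default 0 equal Python's far[li] read/write
-- (Python's locals left/li are written inline here)
def bStep (N : Int) (far : List Int) (p : Int × Int) : List Int :=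
  if p.1 - p.2 < N then
    if p.1 + p.2 > far.getD ((max (p.1 - p.2) 0).toNat) 0
    then far.set ((max (p.1 - p.2) 0).toNat) (p.1 + p.2) else far
  else far

-- B's final 'while end < n' loop; fuel is only a totality guard: 'end' strictly increases
-- inside [0,n), so n.toNat + 1 iterations are never exhausted on the inputs Python reaches
def bLoop (fuel : Nat) (n N : Int) (far : List Int) (e taps : Int) : Int :=
  match fuel with
  | 0 => -1
  | f + 1 =>
    if e < n then
      let nw := max e (far.getD ((min e (N - 1)).toNat) 0)
      if nw == e then -1
      else bLoop f n N far nw (taps + 1)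
    else taps

def solution_875_3_alt (n : Int) (ranges : List Int) : Int :=
  if n ≤ 0 then 0
  else
    let N := min n (ranges.length : Int)
    if N = 0 then -1
    else
      -- far = list(range(N))
      let far0 := PySem.List.pyRange 0 N 1
      -- build max-reach array
      let far1 := (PySem.List.enumerate ranges).foldl (bStep N) far0
      -- running prefix maximum: acc/mx loop (far[0] is in range since N > 0)
      let far2 := (far1.foldl
        (fun (st : List Int × Int) v => (st.1 ++ [max st.2 v], max st.2 v))
        (([] : List Int), far1.getD 0 0)).1
      bLoop (n.toNat + 1) n N far2 0 0

-- ===== PRECONDITION & SPEC =====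
def Spec_solution_875_3 (n : Int) (ranges : List Int) (out : Int) : Prop := out = solution_875_3_alt n ranges
instance (n : Int) (ranges : List Int) (out : Int) : Decidable (Spec_solution_875_3 n ranges out) := by unfold Spec_solution_875_3; infer_instance

-- ===== CLAIM (what is proved, stated in full; the proofs are below) =====
def Claim_equal_solution_875_3 : Prop := ∀ (n : Int) (ranges : List Int), Dom_solution_875_3 n ranges → Spec_solution_875_3 n ranges (solution_875_3 n ranges)

-- ===== LEMMAS AND PROOFS =====

-- the abstract step both sides compute: "max of e and all right endpoints of taps opening ≤ e"
def gStep (e : Int) : Int → Int × Int → Int :=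
  fun acc p => if p.1 - p.2 ≤ e then max acc (p.1 + p.2) else acc

-- prefix maximum of the first k+1 entries of far (all relevant entries are ≥ 0)
def Q (far : List Int) (k : Nat) : Int := (far.take (k + 1)).foldl max 0

def FarInv (far : List Int) : Prop := ∀ j : Nat, 0 ≤ far.getD j 0

-- functional scan used only in the proofs to name the result of B's acc/m loop
def bScan : Int → List Int → List Int
  | _, [] => []
  | m, v :: t => (max m v) :: bScan (max m v) t

theorem foldl_max_pull (l : List Int) : ∀ a b : Int, l.foldl max (max a b) = max (l.foldl max a) b := by
  induction l with
  | nil => intro a b; rfl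
  | cons v t ih =>
    intro a b
    simp only [List.foldl_cons]
    have h1 : max (max a b) v = max (max a v) b := by omega
    rw [h1, ih]

theorem foldl_ge_init {α : Type} (f : Int → α → Int) (hf : ∀ a x, a ≤ f a x) (l : List α) :
    ∀ init : Int, init ≤ l.foldl f init := by
  induction l with
  | nil => intro init; simp
  | cons v t ih => intro init; exact le_trans (hf init v) (ih (f init v))

theorem aStep_ge (ranges : List Int) (s e0 : Int) : e0 ≤ aStep ranges s e0 := by
  unfold aStep
  apply foldl_ge_init
  intro a x
  split
  · omega
  · exact le_refl a

-- A's inner loop is the abstract fold over enumerate(ranges)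
theorem aStep_eq_gfold (ranges : List Int) (e : Int) :
    aStep ranges e e = (PySem.List.enumerate ranges).foldl (gStep e) e := by
  rw [PySem.List.enumerate_eq_map_pyRange ranges 0, List.foldl_map]
  unfold aStep
  simp only [PySem.List.len_eq]
  congr 1
  funext acc i
  unfold gStep
  simp only
  split_ifs <;> omega

theorem Q_ge_getD (far : List Int) : ∀ (li k : Nat), li < far.length → li ≤ k →
    far.getD li 0 ≤ Q far k := by
  induction far with
  | nil => intro li k h; simp at h
  | cons v t ih =>
    intro li k hlen hlk
    match li, k with
    | 0, k =>
      simp only [List.getD_cons_zero]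
      unfold Q
      simp only [List.take_succ_cons, List.foldl_cons]
      exact le_trans (by omega : v ≤ max 0 v) (foldl_ge_init max (fun a x => le_max_left a x) _ _)
    | j + 1, 0 => omega
    | j + 1, m + 1 =>
      simp only [List.getD_cons_succ]
      unfold Q
      simp only [List.take_succ_cons, List.foldl_cons]
      have h0v : (max 0 v) = max 0 v := rfl
      calc t.getD j 0 ≤ Q t m := ih j m (by simpa using hlen) (by omega)
        _ ≤ max (Q t m) v := le_max_left _ _
        _ = (t.take (m+1)).foldl max (max 0 v) := by
              unfold Q; rw [show (max 0 v) = max (0 : Int) v from rfl, foldl_max_pull]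

theorem Q_set (far : List Int) : ∀ (li k : Nat) (r : Int), li < far.length →
    far.getD li 0 ≤ r →
    Q (far.set li r) k = if li ≤ k then max (Q far k) r else Q far k := by
  induction far with
  | nil => intro li k r h; simp at h
  | cons v t ih =>
    intro li k r hlen hle
    match li, k with
    | 0, k =>
      simp only [List.getD_cons_zero] at hle
      simp only [List.set_cons_zero, Nat.zero_le, if_true]
      unfold Q
      simp only [List.take_succ_cons, List.foldl_cons]
      have h1 : (max 0 r) = max (max (0:Int) v) r := by omega
      rw [h1, foldl_max_pull]
    | j + 1, 0 =>
      simp only [List.set_cons_succ]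
      have : ¬ (j + 1 ≤ 0) := by omega
      rw [if_neg this]
      unfold Q
      simp
    | j + 1, m + 1 =>
      simp only [List.getD_cons_succ] at hle
      simp only [List.set_cons_succ]
      have hjt : j < t.length := by simpa using hlen
      unfold Q
      simp only [List.take_succ_cons, List.foldl_cons]
      have expand : ∀ (l : List Int), l.foldl max (max 0 v) = max (l.foldl max 0) v := by
        intro l; exact foldl_max_pull l 0 v
      rw [expand, expand]
      have hQ := ih j m r hjt hle
      unfold Q at hQ
      rw [hQ]
      by_cases hjm : j ≤ m
      · rw [if_pos hjm, if_pos (by omega : j + 1 ≤ m + 1)]; omega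
      · rw [if_neg hjm, if_neg (by omega : ¬ (j + 1 ≤ m + 1))]

theorem bStep_length (n : Int) (far : List Int) (p : Int × Int) :
    (bStep n far p).length = far.length := by
  unfold bStep
  split_ifs <;> simp

theorem bStep_inv (n : Int) (far : List Int) (p : Int × Int) (h : FarInv far) : FarInv (bStep n far p) := by
  unfold bStep
  split_ifs with h1 h2
  · rcases Nat.lt_or_ge ((max (p.1 - p.2) 0).toNat) far.length with hlt | hge
    · intro j
      have hh := h j
      rw [List.getD_eq_getElem?_getD] at hh ⊢
      rw [List.getD_eq_getElem?_getD] at h2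
      by_cases hj : j = (max (p.1 - p.2) 0).toNat
      · subst hj
        rw [List.getElem?_set_self hlt]
        simp only [Option.getD_some]
        omega
      · rw [List.getElem?_set_ne (by omega)]
        exact hh
    · rw [List.set_eq_of_length_le (by omega)]
      exact h
  · exact h
  · exact h

-- main build invariant: the prefix max (up to index min(e,N-1)) of the built array,
-- joined with e, is the abstract fold; every processed pair (i,r) has 0 <= i < len(ranges)
theorem build_max_Q (n : Int) (ranges : List Int) (N : Int) (hN : N = min n (ranges.length : Int))
    (hN1 : 1 ≤ N) (e : Int) (he0 : 0 ≤ e) (hen : e < n) :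
    ∀ (ps : List (Int × Int)), (∀ p ∈ ps, 0 ≤ p.1 ∧ p.1 < (ranges.length : Int)) →
    ∀ (far : List Int), far.length = N.toNat → FarInv far →
    max e (Q (ps.foldl (bStep N) far) ((min e (N - 1)).toNat))
      = ps.foldl (gStep e) (max e (Q far ((min e (N - 1)).toNat))) := by
  intro ps
  induction ps with
  | nil => intro _ far _ _; rfl
  | cons p t ih =>
    intro hps far hlen hinv
    have hp := hps p (List.mem_cons_self)
    have hpt : ∀ q ∈ t, 0 ≤ q.1 ∧ q.1 < (ranges.length : Int) :=
      fun q hq => hps q (List.mem_cons_of_mem p hq)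
    simp only [List.foldl_cons]
    have hklt : (min e (N - 1)).toNat < far.length := by rw [hlen]; omega
    have hstep : max e (Q (bStep N far p) ((min e (N - 1)).toNat))
        = gStep e (max e (Q far ((min e (N - 1)).toNat))) p := by
      unfold bStep gStep
      by_cases h1 : p.1 - p.2 < N
      · simp only [if_pos h1]
        set li := (max (p.1 - p.2) 0).toNat with hli
        have hlilt : li < far.length := by rw [hlen]; omega
        by_cases h2 : p.1 + p.2 > far.getD li 0
        · simp only [if_pos h2]
          rw [Q_set far li ((min e (N - 1)).toNat) (p.1 + p.2) hlilt (by omega)]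
          by_cases h3 : p.1 - p.2 ≤ e
          · rw [if_pos (by omega : li ≤ (min e (N - 1)).toNat), if_pos h3]
            omega
          · rw [if_neg (by omega : ¬ li ≤ (min e (N - 1)).toNat), if_neg h3]
        · simp only [if_neg h2]
          by_cases h3 : p.1 - p.2 ≤ e
          · rw [if_pos h3]
            have := Q_ge_getD far li ((min e (N - 1)).toNat) hlilt (by omega)
            omega
          · rw [if_neg h3]
      · simp only [if_neg h1]
        by_cases h3 : p.1 - p.2 ≤ e
        · -- a tap with N <= left <= e: then N = len(ranges), its range is negative and its
          -- right endpoint lies strictly below e, so it cannot extend the reach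
          rw [if_pos h3]
          have : p.1 + p.2 < e := by omega
          omega
        · rw [if_neg h3]
    rw [ih hpt (bStep N far p) (by rw [bStep_length, hlen]) (bStep_inv N far p hinv), hstep]

theorem foldl_max_range : ∀ k : Nat, ((List.range (k + 1)).map (fun j : Nat => (j : Int))).foldl max 0 = (k : Int) := by
  intro k
  induction k with
  | zero => simp [List.range_succ]
  | succ m ih =>
    rw [List.range_succ, List.map_append, List.foldl_append, ih]
    simp only [List.map_cons, List.map_nil, List.foldl_cons, List.foldl_nil]
    omega

theorem Q_far0 (n : Int) : ∀ (k : Nat), k < n.toNat →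
    Q (PySem.List.pyRange 0 n 1) k = (k : Int) := by
  have hrw : PySem.List.pyRange 0 n 1 = (List.range (n).toNat).map (fun j : Nat => (j : Int)) := by
    rw [PySem.List.pyRange_one]
    simp
  rw [hrw]
  intro k hk
  unfold Q
  rw [← List.map_take, List.take_range]
  have hmin : min (k + 1) n.toNat = k + 1 := by omega
  rw [hmin]
  exact foldl_max_range (k)

theorem far0_length (n : Int) : (PySem.List.pyRange 0 n 1).length = n.toNat := by
  rw [PySem.List.length_pyRange_one]; simp

theorem far0_inv (n : Int) : FarInv (PySem.List.pyRange 0 n 1) := by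
  intro j
  rcases Nat.lt_or_ge j (PySem.List.pyRange 0 n 1).length with hlt | hge
  · rw [List.getD_eq_getElem?_getD, List.getElem?_eq_getElem hlt]
    simp only [Option.getD_some]
    rw [PySem.List.getElem_pyRange_one]
    omega
  · rw [List.getD_eq_getElem?_getD, List.getElem?_eq_none (by omega)]
    simp

-- B's acc/m fold is bScan
theorem scan_fold (l : List Int) : ∀ (acc : List Int) (m : Int),
    (l.foldl (fun (st : List Int × Int) v => (st.1 ++ [max st.2 v], max st.2 v)) (acc, m)).1
      = acc ++ bScan m l := by
  induction l with
  | nil => intro acc m; simp [bScan]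
  | cons v t ih =>
    intro acc m
    simp only [List.foldl_cons, bScan]
    rw [ih]
    simp

theorem bScan_getD (l : List Int) : ∀ (m : Int) (k : Nat), k < l.length →
    (bScan m l).getD k 0 = (l.take (k + 1)).foldl max m := by
  induction l with
  | nil => intro m k h; simp at h
  | cons v t ih =>
    intro m k hk
    match k with
    | 0 => simp [bScan]
    | j + 1 =>
      simp only [bScan, List.getD_cons_succ, List.take_succ_cons, List.foldl_cons]
      exact ih (max m v) j (by simpa using hk)

-- prefix max with far[0] as initial value equals Q, when far[0] ≥ 0 and far is nonempty
theorem foldl_head_eq_Q (far : List Int) (hne : far ≠ []) (h0 : 0 ≤ far.getD 0 0) (k : Nat) :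
    (far.take (k + 1)).foldl max (far.getD 0 0) = Q far k := by
  match far, hne with
  | v :: t, _ =>
    simp only [List.getD_cons_zero] at h0 ⊢
    unfold Q
    simp only [List.take_succ_cons, List.foldl_cons]
    have h1 : max (0 : Int) v = v := by omega
    rw [h1]
    have h2 : max v v = v := by omega
    rw [h2]

theorem build_length (n : Int) (ps : List (Int × Int)) : ∀ far : List Int,
    (ps.foldl (bStep n) far).length = far.length := by
  induction ps with
  | nil => intro far; rfl
  | cons p t ih => intro far; simp only [List.foldl_cons]; rw [ih, bStep_length]

theorem build_inv (n : Int) (ps : List (Int × Int)) : ∀ far : List Int, FarInv far →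
    FarInv (ps.foldl (bStep n) far) := by
  induction ps with
  | nil => intro far h; exact h
  | cons p t ih => intro far h; exact ih (bStep n far p) (bStep_inv n far p h)

-- the two while loops agree, given that the (capped) lookup computes A's inner loop
theorem loops_eq (n N : Int) (ranges far : List Int)
    (htab : ∀ e : Int, 0 ≤ e → e < n →
      max e (far.getD ((min e (N - 1)).toNat) 0) = aStep ranges e e) :
    ∀ (fuel : Nat) (e taps : Int), 0 ≤ e →
    aLoop fuel n ranges e e taps = bLoop fuel n N far e taps := by
  intro fuel
  induction fuel with
  | zero => intro e taps _; rfl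
  | succ f ih =>
    intro e taps he
    unfold aLoop bLoop
    by_cases hlt : e < n
    · simp only [if_pos hlt]
      rw [htab e he hlt]
      by_cases heq : e = aStep ranges e e
      · have h1 : (e == aStep ranges e e) = true := beq_iff_eq.mpr heq
        have h2 : (aStep ranges e e == e) = true := beq_iff_eq.mpr heq.symm
        simp [h1, h2]
      · have h1 : (e == aStep ranges e e) = false := beq_eq_false_iff_ne.mpr heq
        have h2 : (aStep ranges e e == e) = false := beq_eq_false_iff_ne.mpr (Ne.symm heq)
        simp only [h1, Bool.false_eq_true, if_false]
        simp only [h2, Bool.false_eq_true, if_false]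
        exact ih (aStep ranges e e) (taps + 1) (le_trans he (aStep_ge ranges e e))
    · simp [hlt]

theorem step_table (n : Int) (ranges : List Int) (N : Int) (hN : N = min n (ranges.length : Int))
    (hn : 0 < n) (hm : 1 ≤ (ranges.length : Int)) :
    ∀ e : Int, 0 ≤ e → e < n →
    max e ((((PySem.List.enumerate ranges).foldl (bStep N) (PySem.List.pyRange 0 N 1)).foldl
        (fun (st : List Int × Int) v => (st.1 ++ [max st.2 v], max st.2 v))
        (([] : List Int), ((PySem.List.enumerate ranges).foldl (bStep N) (PySem.List.pyRange 0 N 1)).getD 0 0)).1.getD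
          ((min e (N - 1)).toNat) 0)
      = aStep ranges e e := by
  intro e he hen
  have hN1 : 1 ≤ N := by omega
  set far1 := (PySem.List.enumerate ranges).foldl (bStep N) (PySem.List.pyRange 0 N 1) with hfar1
  have hlen1 : far1.length = N.toNat := by
    rw [hfar1, build_length, far0_length]
  have hinv1 : FarInv far1 := by
    rw [hfar1]; exact build_inv N _ _ (far0_inv N)
  have hne : far1 ≠ [] := by
    intro h; rw [h] at hlen1; simp at hlen1; omega
  have hklt : (min e (N - 1)).toNat < far1.length := by omega
  rw [scan_fold far1 [] (far1.getD 0 0)]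
  simp only [List.nil_append]
  rw [bScan_getD far1 (far1.getD 0 0) ((min e (N - 1)).toNat) hklt]
  rw [foldl_head_eq_Q far1 hne (hinv1 0) ((min e (N - 1)).toNat)]
  have hps : ∀ p ∈ PySem.List.enumerate ranges, 0 ≤ p.1 ∧ p.1 < (ranges.length : Int) := by
    intro p hp
    rw [PySem.List.mem_enumerate_iff] at hp
    obtain ⟨k, hk, rfl⟩ := hp
    constructor <;> [omega; (simp only [zero_add]; exact_mod_cast hk)]
  rw [hfar1, build_max_Q n ranges N hN hN1 e he hen (PySem.List.enumerate ranges) hps _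
        (far0_length N) (far0_inv N)]
  rw [Q_far0 N ((min e (N - 1)).toNat) (by omega)]
  rw [aStep_eq_gfold]
  have h1 : max e (((min e (N - 1)).toNat : Nat) : Int) = e := by omega
  rw [h1]

-- ===== VERDICT (by name: the statement is the Claim_ definition above) =====
theorem solution_875_3_spec : Claim_equal_solution_875_3 := by
  intro n ranges _
  unfold Spec_solution_875_3 solution_875_3 solution_875_3_alt
  by_cases hn : n ≤ 0
  · rw [if_pos hn]
    unfold aLoop
    rw [if_neg (by omega : ¬ (0 : Int) < n)]
  · rw [if_neg hn]
    by_cases hm : ranges = []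
    · subst hm
      rw [if_pos (by simp; omega : min n ((List.length ([] : List Int)) : Int) = 0)]
      unfold aLoop
      rw [if_pos (by omega : (0 : Int) < n)]
      have hstep : aStep [] 0 0 = 0 := by
        unfold aStep
        rw [show ((List.length ([] : List Int)) : Int) = 0 by simp,
            PySem.List.pyRange_one_eq_nil (le_refl 0)]
        rfl
      simp [hstep]
    · have hm1 : 1 ≤ (ranges.length : Int) := by
        have : ranges.length ≠ 0 := fun h => hm (List.eq_nil_of_length_eq_zero h)
        omega
      rw [if_neg (by omega : ¬ min n (ranges.length : Int) = 0)]
      simp only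
      exact loops_eq n (min n (ranges.length : Int)) ranges _
        (step_table n ranges (min n (ranges.length : Int)) rfl (by omega) hm1)
        (n.toNat + 1) 0 0 le_rfl
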